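-- pv_equiv track=rewrite | github.com/Dimasneas/coolcalc | src/coolcalc/calc.py | factorial_expr
-- ===== SOURCE A (Python) =====
-- from typing import Tuple
--
-- MATH_SIGNS = ['+', '*', '/', '-', '^']
--
-- def factorial_expr(expr: str) -> Tuple[int, str]:
--     """
--     Выбирает выражение которое должно вычисляться под знаком факториала
--     :param expr: выражение для поиска.
--     :returns: Возвращает кортеж (начальная позиция выражения, вычисляемое выражение)
--     """
--
--     sign_ids = []
--     last_sign = expr[-1]
--     exp_len = len(expr)
--     if last_sign in MATH_SIGNS:
--         expr = expr[:-1]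
--
--     # Нахождение всех знаков
--     for sign in MATH_SIGNS:
--         sign_ids += list(i for i in range(len(expr)) if expr.startswith(sign, i))
--     sign_ids.sort()
--
--     # Нахождение всех скобок
--     stack = []
--     bracket = []
--     for i, c in enumerate(expr):
--         if c == "(":
--             stack.append(i)
--         elif c == ")":
--             idx = stack.pop()
--             bracket.append([idx, i])
--
--     # Нахождение вложенных скобок и знаков в них
--     signs = []
--     for i in sign_ids:
--         s = []
--         for pair in bracket:
--             if pair[0] < i < pair[1]:
--                 s.append(i)
--         if i not in s:
--             signs.append(i)
--     signs.sort()
--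
--     #  Проверка существования знаков
--     if signs:
--         start = max(signs) + 1
--     else:
--         start = 0
--     expr = expr[start:]
--
--     if last_sign in MATH_SIGNS:
--         start = exp_len + 1
--
--     return start, expr
-- ===== SOURCE B (Python) =====
-- MATH_SIGNS = ['+', '*', '/', '-', '^']
--
-- def factorial_expr(expr):
--     last_sign = expr[-1]
--     exp_len = len(expr)
--     body = expr[:-1] if last_sign in MATH_SIGNS else expr
--     # single left-to-right pass: `last` = index of the rightmost operator not
--     # enclosed in any matched pair of parentheses seen so far; entering '('
--     # saves `last`, a matching ')' restores it (everything inside is enclosed).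
--     stack = []
--     last = -1
--     for i, c in enumerate(body):
--         if c == '(':
--             stack.append(last)
--         elif c == ')':
--             last = stack.pop()
--         elif c in MATH_SIGNS:
--             last = i
--     start = last + 1
--     tail = body[start:]
--     if last_sign in MATH_SIGNS:
--         start = exp_len + 1
--     return start, tail
-- ===== Notes on version B (the rewrite author's own statement) =====
-- stated objective: faster
-- what changed: A finds all operator positions per sign, sorts them, builds the full list of matched bracket pairs and filters positions by a nested pair-covering scan before taking the max; B makes one left-to-right pass keeping the index of the last operator outside matched parentheses, pushing it on '(' and restoring it on ')'.
import Mathlib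
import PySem

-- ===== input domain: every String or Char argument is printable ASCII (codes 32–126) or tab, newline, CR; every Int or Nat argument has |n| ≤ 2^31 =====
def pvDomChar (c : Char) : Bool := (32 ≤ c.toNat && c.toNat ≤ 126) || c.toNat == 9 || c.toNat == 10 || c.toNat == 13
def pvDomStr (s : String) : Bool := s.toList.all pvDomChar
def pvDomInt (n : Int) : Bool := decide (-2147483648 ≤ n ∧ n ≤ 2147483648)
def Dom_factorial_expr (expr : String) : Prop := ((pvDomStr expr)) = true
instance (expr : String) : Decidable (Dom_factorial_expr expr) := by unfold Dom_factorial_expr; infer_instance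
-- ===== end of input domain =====

-- B replaces A's several passes (per-sign position lists + sort + bracket-pair list +
-- a nested covering scan + sort + max) by one left-to-right pass that keeps the index of
-- the last operator outside matched parentheses, saving/restoring it at '('/')'.

-- ===== PORT A =====
def pvMathSigns : List Char := ['+', '*', '/', '-', '^']

-- one step of A's bracket-collecting loop (Python list append/pop() is LIFO, modelled
-- head-first; the empty-stack ')' case is Python's IndexError, excluded by Pre_)
def pvStepA (st : List Int × List (Int × Int)) (ic : Int × Char) : List Int × List (Int × Int) :=
  if ic.2 = '(' then (ic.1 :: st.1, st.2)
  else if ic.2 = ')' then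
    match st.1 with
    | [] => st
    | a :: rest => (rest, st.2 ++ [(a, ic.1)])
  else st

def factorial_expr (expr : String) : Int × String :=
  let l0 := expr.toList
  let lastSign := (PySem.List.pyGet? l0 (-1)).getD ' '
  let expLen : Int := (l0.length : Int)
  let l := if lastSign ∈ pvMathSigns then PySem.List.slice l0 none (some (-1)) else l0
  let signIds := pvMathSigns.foldl (fun acc sign =>
      acc ++ (PySem.List.pyRange 0 (l.length : Int) 1).filter
        (fun i => PySem.Chars.startswith (PySem.List.slice l (some i) none) [sign])) []
  let signIds := PySem.List.sorted signIds (fun x => x) false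
  let sb := (PySem.List.enumerate l 0).foldl pvStepA ([], [])
  let bracket := sb.2
  let signs := signIds.foldl (fun acc i =>
      let s := bracket.foldl (fun s p => if p.1 < i ∧ i < p.2 then s ++ [i] else s) ([] : List Int)
      if i ∉ s then acc ++ [i] else acc) []
  let signs := PySem.List.sorted signs (fun x => x) false
  let start : Int := match signs with
    | [] => 0
    | _ => ((PySem.List.max? signs (fun x => x)).getD 0) + 1
  let l2 := PySem.List.slice l (some start) none
  let start := if lastSign ∈ pvMathSigns then expLen + 1 else start
  (start, String.ofList l2)

-- ===== PORT B =====
-- one step of B's single pass: '(' saves `last`, ')' restores it (the empty-stack ')'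
-- is the same IndexError as in A, excluded by Pre_), an operator records its index
def pvStepB (st : List Int × Int) (ic : Int × Char) : List Int × Int :=
  if ic.2 = '(' then (st.2 :: st.1, st.2)
  else if ic.2 = ')' then
    match st.1 with
    | [] => st
    | v :: rest => (rest, v)
  else if ic.2 ∈ pvMathSigns then (st.1, ic.1) else st

def factorial_expr_alt (expr : String) : Int × String :=
  let lastSign := (PySem.List.pyGet? expr.toList (-1)).getD ' '
  let expLen : Int := (expr.toList.length : Int)
  let body := if lastSign ∈ pvMathSigns then PySem.List.slice expr.toList none (some (-1))
              else expr.toList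
  let sl := (PySem.List.enumerate body 0).foldl pvStepB ([], -1)
  let start : Int := sl.2 + 1
  let tail := PySem.List.slice body (some start) none
  let start := if lastSign ∈ pvMathSigns then expLen + 1 else start
  (start, String.ofList tail)

-- ===== PRECONDITION & SPEC =====
-- Pre_ excludes exactly the inputs where the Python A raises an IndexError: the empty
-- string (expr[-1]) and strings with an unmatched ')' (stack.pop() on an empty list);
-- B raises there too.
def Pre_factorial_expr (expr : String) : Prop :=
  expr.toList ≠ [] ∧
  ∀ k, k ≤ expr.toList.length →
    (expr.toList.take k).count ')' ≤ (expr.toList.take k).count '('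
instance (expr : String) : Decidable (Pre_factorial_expr expr) := by
  unfold Pre_factorial_expr; infer_instance

def pvWitness_factorial_expr : String := "(1+2)*3"

def Spec_factorial_expr (expr : String) (out : Int × String) : Prop := out = factorial_expr_alt expr
instance (expr : String) (out : Int × String) : Decidable (Spec_factorial_expr expr out) := by
  unfold Spec_factorial_expr; infer_instance

-- ===== CLAIM (what is proved, stated in full; the proofs are below) =====
def Claim_equal_factorial_expr : Prop := ∀ (expr : String), Dom_factorial_expr expr → Pre_factorial_expr expr → Spec_factorial_expr expr (factorial_expr expr)

-- ===== LEMMAS AND PROOFS =====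
def pvCov (P : List (Int × Int)) (i : Int) : Prop := ∃ p ∈ P, p.1 < i ∧ i < p.2
def pvOp (done : List Char) (i : Nat) : Prop := done.getD i ' ' ∈ pvMathSigns
def pvTL (done : List Char) (P : List (Int × Int)) (last : Int) : Prop :=
  (last = -1 ∨ (0 ≤ last ∧ pvOp done last.toNat ∧ ¬ pvCov P last)) ∧
  (∀ i : Nat, pvOp done i → ¬ pvCov P (i : Int) → (i : Int) ≤ last)
def pvSafe : List Char → Nat → Prop
  | [], _ => True
  | c :: r, d =>
    if c = '(' then pvSafe r (d + 1)
    else if c = ')' then 0 < d ∧ pvSafe r (d - 1)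
    else pvSafe r d
def pvPairsOK (done : List Char) (P : List (Int × Int)) : Prop :=
  ∀ p ∈ P, 0 ≤ p.1 ∧ p.1 < p.2 ∧ p.2 < (done.length : Int)
def pvFrames (done : List Char) (P : List (Int × Int)) : List (Int × Int) → Int → Prop
  | [], _ => True
  | (a, v) :: rest, ub =>
      0 ≤ a ∧ a < ub ∧ (a : Int) ≤ (done.length : Int) ∧ done.getD a.toNat ' ' = '(' ∧
      pvTL (done.take a.toNat) P v ∧ pvFrames done P rest a

-- small facts
theorem pvOp_lt {done : List Char} {i : Nat} (h : pvOp done i) : i < done.length := by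
  by_contra hc
  push_neg at hc
  rw [pvOp, List.getD_eq_default _ _ hc] at h
  revert h; decide

theorem pvOp_take {done : List Char} {a i : Nat} (hia : i < a) :
    pvOp (done.take a) i ↔ pvOp done i := by
  unfold pvOp
  rw [List.getD_eq_getElem?_getD, List.getD_eq_getElem?_getD, List.getElem?_take]
  simp [hia]

theorem pvOp_append_left {done e : List Char} {i : Nat} (h : i < done.length) :
    pvOp (done ++ e) i ↔ pvOp done i := by
  unfold pvOp
  rw [List.getD_eq_getElem?_getD, List.getD_eq_getElem?_getD, List.getElem?_append_left h]

theorem pvOp_append_right {done : List Char} {c : Char} :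
    pvOp (done ++ [c]) done.length ↔ c ∈ pvMathSigns := by
  unfold pvOp
  rw [List.getD_eq_getElem?_getD, List.getElem?_append_right (le_refl _)]
  simp

theorem pvCov_append {P : List (Int × Int)} {q : Int × Int} {i : Int} :
    pvCov (P ++ [q]) i ↔ pvCov P i ∨ (q.1 < i ∧ i < q.2) := by
  simp only [pvCov, List.mem_append, List.mem_singleton, Prod.exists]
  constructor
  · rintro ⟨a, b, hab | hab, h1, h2⟩
    · exact Or.inl ⟨a, b, hab, h1, h2⟩
    · subst hab; exact Or.inr ⟨h1, h2⟩
  · rintro (⟨a, b, hab, h1, h2⟩ | ⟨h1, h2⟩)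
    · exact ⟨a, b, Or.inl hab, h1, h2⟩
    · exact ⟨q.1, q.2, Or.inr rfl, h1, h2⟩

theorem pvCov_mono {P : List (Int × Int)} {q : Int × Int} {i : Int} (h : pvCov P i) :
    pvCov (P ++ [q]) i := pvCov_append.2 (Or.inl h)

theorem pvTL_extend {done' : List Char} {P : List (Int × Int)} {q : Int × Int} {v : Int}
    (hTL : pvTL done' P v) (hq : (done'.length : Int) ≤ q.1) : pvTL done' (P ++ [q]) v := by
  obtain ⟨h1, h2⟩ := hTL
  constructor
  · rcases h1 with h | ⟨hv0, hop, hnc⟩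
    · exact Or.inl h
    · refine Or.inr ⟨hv0, hop, ?_⟩
      intro hc
      rcases pvCov_append.1 hc with hc | ⟨hc1, _⟩
      · exact hnc hc
      · have := pvOp_lt hop
        omega
  · intro i hop hnc
    exact h2 i hop (fun hc => hnc (pvCov_mono hc))

theorem pvFrames_mono {done : List Char} {P : List (Int × Int)} {cs : List (Int × Int)}
    {ub ub' : Int} (h : pvFrames done P cs ub) (hub : ub ≤ ub') : pvFrames done P cs ub' := by
  cases cs with
  | nil => trivial
  | cons f rest =>
    obtain ⟨a, v⟩ := f
    obtain ⟨h1, h2, h3, h4, h5, h6⟩ := h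
    exact ⟨h1, lt_of_lt_of_le h2 hub, h3, h4, h5, h6⟩

theorem pvFrames_extendP {done : List Char} {P : List (Int × Int)} {cs : List (Int × Int)}
    {ub : Int} {q : Int × Int} (h : pvFrames done P cs ub) (hub : ub ≤ q.1) :
    pvFrames done (P ++ [q]) cs ub := by
  induction cs generalizing ub with
  | nil => trivial
  | cons f rest ih =>
    obtain ⟨a, v⟩ := f
    obtain ⟨h1, h2, h3, h4, h5, h6⟩ := h
    refine ⟨h1, h2, h3, h4, pvTL_extend h5 ?_, ih h6 (le_trans (le_of_lt h2) hub)⟩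
    have : ((done.take a.toNat).length : Int) ≤ a := by
      simp [List.length_take]
      omega
    exact le_trans this (le_trans (le_of_lt h2) hub)

theorem pvFrames_append {done : List Char} {e : List Char} {P : List (Int × Int)}
    {cs : List (Int × Int)} {ub : Int} (h : pvFrames done P cs ub) :
    pvFrames (done ++ e) P cs ub := by
  induction cs generalizing ub with
  | nil => trivial
  | cons f rest ih =>
    obtain ⟨a, v⟩ := f
    obtain ⟨h1, h2, h3, h4, h5, h6⟩ := h
    have halt : a.toNat < done.length := by
      by_contra hc
      push_neg at hc
      rw [List.getD_eq_default _ _ hc] at h4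
      exact absurd h4 (by decide)
    constructor
    · exact h1
    refine ⟨h2, ?_, ?_, ?_, ih h6⟩
    · simp; omega
    · rw [List.getD_eq_getElem?_getD, List.getElem?_append_left halt,
        ← List.getD_eq_getElem?_getD]; exact h4
    · rw [List.take_append_of_le_length (le_of_lt halt)]; exact h5

theorem pvPairsOK_append {done e : List Char} {P : List (Int × Int)} (h : pvPairsOK done P) :
    pvPairsOK (done ++ e) P := by
  intro p hp
  obtain ⟨h1, h2, h3⟩ := h p hp
  refine ⟨h1, h2, ?_⟩
  simp only [List.length_append]
  push_cast
  omega

theorem pvTL_append_nonsign {done : List Char} {P : List (Int × Int)} {last : Int} {c : Char}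
    (h : pvTL done P last) (hc : c ∉ pvMathSigns) : pvTL (done ++ [c]) P last := by
  obtain ⟨h1, h2⟩ := h
  constructor
  · rcases h1 with h | ⟨hv0, hop, hnc⟩
    · exact Or.inl h
    · exact Or.inr ⟨hv0, (pvOp_append_left (pvOp_lt hop)).2 hop, hnc⟩
  · intro i hop hnc
    have hi : i < done.length + 1 := by
      have := pvOp_lt hop
      simpa using this
    rcases Nat.lt_or_ge i done.length with hlt | hge
    · exact h2 i ((pvOp_append_left hlt).1 hop) hnc
    · have hi' : i = done.length := by omega
      subst hi'
      exact absurd (pvOp_append_right.1 hop) hc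

set_option maxRecDepth 8192 in
theorem pvMain (rest : List Char) : ∀ (done : List Char) (P : List (Int × Int))
    (cs : List (Int × Int)) (last : Int),
    pvSafe rest cs.length →
    pvPairsOK done P →
    pvFrames done P cs (done.length : Int) →
    pvTL done P last →
    pvPairsOK (done ++ rest)
      ((PySem.List.enumerate rest (done.length : Int)).foldl pvStepA (cs.map Prod.fst, P)).2 ∧
    pvTL (done ++ rest)
      ((PySem.List.enumerate rest (done.length : Int)).foldl pvStepA (cs.map Prod.fst, P)).2
      ((PySem.List.enumerate rest (done.length : Int)).foldl pvStepB (cs.map Prod.snd, last)).2 := by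
  induction rest with
  | nil =>
    intro done P cs last _ hP _ hTL
    simpa [PySem.List.enumerate_nil] using ⟨hP, hTL⟩
  | cons c r ih =>
    intro done P cs last hsafe hP hF hTL
    rw [PySem.List.enumerate_cons]
    simp only [List.foldl_cons]
    have hdone1 : ((done ++ [c]).length : Int) = (done.length : Int) + 1 := by
      simp
    have happ : done ++ c :: r = (done ++ [c]) ++ r := by simp
    by_cases hc1 : c = '('
    · subst hc1
      have sA : pvStepA (cs.map Prod.fst, P) ((done.length : Int), '(') =
          ((done.length : Int) :: cs.map Prod.fst, P) := by simp [pvStepA]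
      have sB : pvStepB (cs.map Prod.snd, last) ((done.length : Int), '(') =
          (last :: cs.map Prod.snd, last) := by simp [pvStepB]
      rw [sA, sB]
      have hsafe' : pvSafe r ((((done.length : Int), last) :: cs).length) := by
        simpa [pvSafe] using hsafe
      have hTL' : pvTL (done ++ ['(']) P last :=
        pvTL_append_nonsign hTL (by decide)
      have hF' : pvFrames (done ++ ['(']) P (((done.length : Int), last) :: cs)
          (((done ++ ['(']).length : Int)) := by
        refine ⟨by positivity, by rw [hdone1]; omega, by rw [hdone1]; omega, ?_, ?_, ?_⟩
        · rw [Int.toNat_natCast, List.getD_eq_getElem?_getD,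
            List.getElem?_append_right (le_refl _)]
          simp
        · rw [Int.toNat_natCast, List.take_append_of_le_length (le_refl _),
            List.take_length]
          exact hTL
        · exact pvFrames_append hF
      have := ih (done ++ ['(']) P (((done.length : Int), last) :: cs) last hsafe'
        (pvPairsOK_append hP) hF' hTL'
      rw [hdone1] at this
      rw [happ]
      simpa only [List.map_cons] using this
    · by_cases hc2 : c = ')'
      · subst hc2
        cases cs with
        | nil => simp [pvSafe, pvStepA] at hsafe
        | cons f cs' =>
          obtain ⟨a, v⟩ := f
          obtain ⟨ha0, haub, halen, hpar, hTLa, hFrest⟩ := hF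
          have sA : pvStepA (((a, v) :: cs').map Prod.fst, P) ((done.length : Int), ')') =
              (cs'.map Prod.fst, P ++ [(a, (done.length : Int))]) := by
            simp [pvStepA]
          have sB : pvStepB (((a, v) :: cs').map Prod.snd, last) ((done.length : Int), ')') =
              (cs'.map Prod.snd, v) := by
            simp [pvStepB]
          rw [sA, sB]
          have hsafe' : pvSafe r cs'.length := by
            simpa [pvSafe] using hsafe
          have hatn : (a.toNat : Int) = a := Int.toNat_of_nonneg ha0
          have hatlt : a.toNat < done.length := by omega
          -- new pair list
          set q : Int × Int := (a, (done.length : Int)) with hq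
          have hP' : pvPairsOK (done ++ [')']) (P ++ [q]) := by
            intro p hp
            rcases List.mem_append.1 hp with hp | hp
            · exact pvPairsOK_append hP p hp
            · simp only [List.mem_singleton] at hp
              subst hp
              simp only [hq, List.length_append, List.length_cons, List.length_nil]
              push_cast
              exact ⟨ha0, by omega, by omega⟩
          have hF' : pvFrames (done ++ [')']) (P ++ [q]) cs' (((done ++ [')']).length : Int)) := by
            apply pvFrames_append
            apply pvFrames_mono (ub := a)
            · exact pvFrames_extendP hFrest (le_refl _)
            · rw [hdone1]; omega
          -- the restored last is correct for the new pair list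
          have hTL' : pvTL (done ++ [')']) (P ++ [q]) v := by
            obtain ⟨t1, t2⟩ := hTLa
            constructor
            · rcases t1 with t | ⟨hv0, hop, hnc⟩
              · exact Or.inl t
              · have hvlt : v.toNat < a.toNat := by
                  have := pvOp_lt hop
                  simp only [List.length_take] at this
                  omega
                refine Or.inr ⟨hv0, ?_, ?_⟩
                · have := (pvOp_take hvlt).1 hop
                  exact (pvOp_append_left (by omega)).2 this
                · intro hc
                  rcases pvCov_append.1 hc with hc | ⟨hc1, _⟩
                  · exact hnc hc
                  · simp only [hq] at hc1
                    omega
            · intro i hop hnc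
              have hilt : i < done.length + 1 := by
                have := pvOp_lt hop
                simpa using this
              rcases Nat.lt_or_ge i done.length with hlt | hge
              · -- i strictly before the ')' just read
                have hopd : pvOp done i := (pvOp_append_left hlt).1 hop
                rcases Nat.lt_or_ge i a.toNat with hia | hia
                · refine t2 i ((pvOp_take hia).2 hopd) ?_
                  intro hc
                  exact hnc (pvCov_mono hc)
                · rcases Nat.lt_or_ge a.toNat i with hai | hai
                  · -- a < i < done.length: covered by the new pair
                    exfalso
                    apply hnc
                    refine pvCov_append.2 (Or.inr ?_)
                    simp only [hq]
                    constructor <;> omega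
                  · -- i = a: an open paren, not an operator
                    have : i = a.toNat := by omega
                    subst this
                    rw [pvOp, hpar] at hopd
                    exact absurd hopd (by decide)
              · have : i = done.length := by omega
                subst this
                exact absurd (pvOp_append_right.1 hop) (by decide)
          have := ih (done ++ [')']) (P ++ [q]) cs' v hsafe' hP' hF' hTL'
          rw [hdone1] at this
          rw [happ]
          simpa only [List.map_cons] using this
      · have sA : pvStepA (cs.map Prod.fst, P) ((done.length : Int), c) =
            (cs.map Prod.fst, P) := by
          simp [pvStepA, hc1, hc2]
        by_cases hc3 : c ∈ pvMathSigns
        · have sB : pvStepB (cs.map Prod.snd, last) ((done.length : Int), c) =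
              (cs.map Prod.snd, (done.length : Int)) := by
            simp [pvStepB, hc1, hc2, hc3]
          rw [sA, sB]
          have hsafe' : pvSafe r cs.length := by
            simpa [pvSafe, hc1, hc2] using hsafe
          have hTL' : pvTL (done ++ [c]) P (done.length : Int) := by
            constructor
            · refine Or.inr ⟨by positivity, ?_, ?_⟩
              · rw [Int.toNat_natCast]
                exact pvOp_append_right.2 hc3
              · rintro ⟨p, hp, h1, h2⟩
                have := (hP p hp).2.2
                omega
            · intro i hop _
              have := pvOp_lt hop
              simp only [List.length_append, List.length_cons, List.length_nil] at this
              omega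
          have hF' : pvFrames (done ++ [c]) P cs (((done ++ [c]).length : Int)) := by
            apply pvFrames_append
            apply pvFrames_mono hF
            rw [hdone1]; omega
          have := ih (done ++ [c]) P cs (done.length : Int) hsafe'
            (pvPairsOK_append hP) hF' hTL'
          rw [hdone1] at this
          rw [happ]
          simpa only [List.map_cons] using this
        · have sB : pvStepB (cs.map Prod.snd, last) ((done.length : Int), c) =
              (cs.map Prod.snd, last) := by
            simp [pvStepB, hc1, hc2, hc3]
          rw [sA, sB]
          have hsafe' : pvSafe r cs.length := by
            simpa [pvSafe, hc1, hc2] using hsafe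
          have hF' : pvFrames (done ++ [c]) P cs (((done ++ [c]).length : Int)) := by
            apply pvFrames_append
            apply pvFrames_mono hF
            rw [hdone1]; omega
          have := ih (done ++ [c]) P cs last hsafe'
            (pvPairsOK_append hP) hF' (pvTL_append_nonsign hTL hc3)
          rw [hdone1] at this
          rw [happ]
          simpa only [List.map_cons] using this

def pvBracket (l : List Char) : List (Int × Int) :=
  ((PySem.List.enumerate l 0).foldl pvStepA ([], [])).2
def pvLast (l : List Char) : Int :=
  ((PySem.List.enumerate l 0).foldl pvStepB ([], -1)).2
def pvSignIds (l : List Char) : List Int :=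
  PySem.List.sorted
    (pvMathSigns.foldl (fun acc sign =>
      acc ++ (PySem.List.pyRange 0 (l.length : Int) 1).filter
        (fun i => PySem.Chars.startswith (PySem.List.slice l (some i) none) [sign])) [])
    (fun x => x) false
def pvSigns (l : List Char) : List Int :=
  PySem.List.sorted
    ((pvSignIds l).foldl (fun acc i =>
      let s := (pvBracket l).foldl
        (fun s p => if p.1 < i ∧ i < p.2 then s ++ [i] else s) ([] : List Int)
      if i ∉ s then acc ++ [i] else acc) [])
    (fun x => x) false
def pvStartA (l : List Char) : Int :=
  if pvSigns l = [] then 0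
  else ((PySem.List.max? (pvSigns l) (fun x => x)).getD 0) + 1

theorem pvStarts (l : List Char) (k : Nat) (c : Char) :
    [c] <+: l.drop k ↔ l[k]? = some c := by
  have h1 : (l.drop k).head? = l[k]? := by
    simp [List.head?_eq_getElem?, List.getElem?_drop]
  rw [← h1]
  cases hd : l.drop k with
  | nil => simp
  | cons a t => simp [List.cons_prefix_cons, eq_comm]

theorem pvOp_iff (l : List Char) (k : Nat) :
    pvOp l k ↔ (l[k]? = some '+' ∨ l[k]? = some '*' ∨ l[k]? = some '/' ∨
      l[k]? = some '-' ∨ l[k]? = some '^') := by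
  unfold pvOp
  rw [List.getD_eq_getElem?_getD]
  cases h : l[k]? with
  | none => simp [pvMathSigns]
  | some a => simp [pvMathSigns]

theorem pvMemFilterSw (l : List Char) (c : Char) (i : Int) :
    i ∈ (PySem.List.pyRange 0 (l.length : Int) 1).filter
        (fun i => PySem.Chars.startswith (PySem.List.slice l (some i) none) [c]) ↔
      0 ≤ i ∧ i < (l.length : Int) ∧ l[i.toNat]? = some c := by
  rw [List.mem_filter, PySem.List.mem_pyRange_one]
  constructor
  · rintro ⟨⟨h0, hn⟩, hs⟩
    rw [PySem.List.slice_from l h0, PySem.Chars.startswith_iff, pvStarts] at hs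
    exact ⟨h0, hn, hs⟩
  · rintro ⟨h0, hn, hg⟩
    refine ⟨⟨h0, hn⟩, ?_⟩
    rw [PySem.List.slice_from l h0, PySem.Chars.startswith_iff, pvStarts]
    exact hg

theorem mem_pvSignIds (l : List Char) (i : Int) :
    i ∈ pvSignIds l ↔ 0 ≤ i ∧ i < (l.length : Int) ∧ pvOp l i.toNat := by
  unfold pvSignIds
  rw [PySem.List.mem_sorted]
  simp only [pvMathSigns, List.foldl_cons, List.foldl_nil, List.nil_append, List.mem_append]
  rw [pvMemFilterSw, pvMemFilterSw, pvMemFilterSw, pvMemFilterSw, pvMemFilterSw, pvOp_iff]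
  tauto

theorem mem_pvSigns (l : List Char) (i : Int) :
    i ∈ pvSigns l ↔ (0 ≤ i ∧ i < (l.length : Int) ∧ pvOp l i.toNat) ∧
      ¬ pvCov (pvBracket l) i := by
  unfold pvSigns
  rw [PySem.List.mem_sorted]
  have hinner : ∀ j : Int,
      (pvBracket l).foldl (fun s p => if p.1 < j ∧ j < p.2 then s ++ [j] else s)
        ([] : List Int) =
      ((pvBracket l).filter (fun p => decide (p.1 < j ∧ j < p.2))).map (fun _ => j) := by
    intro j
    rw [PySem.List.foldl_append_ite]
    simp
  have houter : ((pvSignIds l).foldl (fun acc i =>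
      let s := (pvBracket l).foldl
        (fun s p => if p.1 < i ∧ i < p.2 then s ++ [i] else s) ([] : List Int)
      if i ∉ s then acc ++ [i] else acc) []) =
      (pvSignIds l).filter (fun i => decide (i ∉
        ((pvBracket l).filter (fun p => decide (p.1 < i ∧ i < p.2))).map (fun _ => i))) := by
    simp only [hinner]
    rw [PySem.List.foldl_append_ite (p := fun i => i ∉
      ((pvBracket l).filter (fun p => decide (p.1 < i ∧ i < p.2))).map (fun _ => i))
      (f := fun i => i)]
    simp
  rw [houter, List.mem_filter, mem_pvSignIds]
  simp only [decide_eq_true_eq, List.mem_map, List.mem_filter, decide_eq_true_eq]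
  unfold pvCov
  simp only [and_true]

theorem pvTL_full (l : List Char) (hsafe : pvSafe l 0) :
    pvTL l (pvBracket l) (pvLast l) := by
  have h0 : pvTL ([] : List Char) [] (-1) := by
    constructor
    · exact Or.inl rfl
    · intro i hop _
      exfalso
      rw [pvOp_iff] at hop
      simp at hop
  have := pvMain l [] [] [] (-1) (by simpa using hsafe)
    (by intro p hp; simp at hp) trivial h0
  simpa [pvBracket, pvLast] using this.2

theorem pvStartA_eq (l : List Char) (hsafe : pvSafe l 0) :
    pvStartA l = pvLast l + 1 := by
  obtain ⟨h1, h2⟩ := pvTL_full l hsafe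
  unfold pvStartA
  rcases h1 with hm1 | ⟨hv0, hop, hnc⟩
  · have hnil : pvSigns l = [] := by
      rw [List.eq_nil_iff_forall_not_mem]
      intro i hi
      rw [mem_pvSigns] at hi
      obtain ⟨⟨hi0, hin, hiop⟩, hinc⟩ := hi
      have := h2 i.toNat hiop (by rwa [Int.toNat_of_nonneg hi0])
      rw [Int.toNat_of_nonneg hi0] at this
      omega
    rw [if_pos hnil, hm1]
    decide
  · have hlt := pvOp_lt hop
    have hmem : pvLast l ∈ pvSigns l := by
      rw [mem_pvSigns]
      exact ⟨⟨hv0, by omega, hop⟩, hnc⟩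
    have hne : pvSigns l ≠ [] := fun h => by simp [h] at hmem
    obtain ⟨m, hm⟩ : ∃ m, PySem.List.max? (pvSigns l) (fun x => x) = some m := by
      cases hmax : PySem.List.max? (pvSigns l) (fun x => x) with
      | none => exact absurd ((PySem.List.max?_eq_none_iff _ _).1 hmax) hne
      | some m => exact ⟨m, rfl⟩
    have hmmem := PySem.List.max?_mem hm
    rw [mem_pvSigns] at hmmem
    obtain ⟨⟨hm0, hmn, hmop⟩, hmnc⟩ := hmmem
    have hle1 : m ≤ pvLast l := by
      have := h2 m.toNat hmop (by rwa [Int.toNat_of_nonneg hm0])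
      rwa [Int.toNat_of_nonneg hm0] at this
    have hle2 : pvLast l ≤ m := PySem.List.max?_isMax hm _ hmem
    rw [if_neg hne, hm]
    simp only [Option.getD_some]
    omega

def pvTrim (expr : String) : List Char :=
  if (PySem.List.pyGet? expr.toList (-1)).getD ' ' ∈ pvMathSigns
  then PySem.List.slice expr.toList none (some (-1)) else expr.toList

theorem pvSafe_of_count (l : List Char) (d : Nat)
    (h : ∀ k, k ≤ l.length → (l.take k).count ')' ≤ (l.take k).count '(' + d) :
    pvSafe l d := by
  induction l generalizing d with
  | nil => trivial
  | cons c r ih =>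
    simp only [pvSafe]
    by_cases h1 : c = '('
    · simp only [h1]
      apply ih
      intro k hk
      have := h (k + 1) (by simpa using hk)
      simp [h1] at this ⊢
      omega
    · by_cases h2 : c = ')'
      · simp only [h2]
        have h0 : 0 < d := by
          have := h 1 (by simp)
          simp [h2, List.count_nil] at this
          omega
        refine ⟨h0, ?_⟩
        apply ih
        intro k hk
        have := h (k + 1) (by simpa using hk)
        simp [h2] at this ⊢
        omega
      · simp only [if_neg h1, if_neg h2]
        apply ih
        intro k hk
        have := h (k + 1) (by simpa using hk)
        simp [h1, h2] at this ⊢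
        omega

theorem pvSafe_trim (l0 : List Char)
    (hcnt : ∀ k, k ≤ l0.length → (l0.take k).count ')' ≤ (l0.take k).count '(')
    (l : List Char) (hl : l = l0 ∨ l = l0.dropLast) : pvSafe l 0 := by
  apply pvSafe_of_count
  rcases hl with hl | hl <;> subst hl
  · intro k hk
    simpa using hcnt k hk
  · intro k hk
    simp only [List.length_dropLast] at hk
    rw [List.dropLast_eq_take, List.take_take, min_eq_left hk]
    simpa using hcnt k (by omega)

theorem pvSafe_pvTrim (expr : String)
    (hcnt : ∀ k, k ≤ expr.toList.length →
      (expr.toList.take k).count ')' ≤ (expr.toList.take k).count '(') :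
    pvSafe (pvTrim expr) 0 := by
  apply pvSafe_trim expr.toList hcnt
  unfold pvTrim
  split_ifs with h
  · rw [PySem.List.slice_to_neg_one]
    exact Or.inr rfl
  · exact Or.inl rfl

theorem pvFinal (expr : String) (hpre : Pre_factorial_expr expr) :
    factorial_expr expr = factorial_expr_alt expr := by
  obtain ⟨-, hcnt⟩ := hpre
  have hsafe := pvSafe_pvTrim expr hcnt
  delta factorial_expr factorial_expr_alt
  dsimp only []
  have hL : pvTrim expr = (if (PySem.List.pyGet? expr.toList (-1)).getD ' ' ∈ pvMathSigns
      then PySem.List.slice expr.toList none (some (-1)) else expr.toList) := rfl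
  rw [← hL]
  have hLa : (List.foldl pvStepB ([], -1) (PySem.List.enumerate (pvTrim expr) 0)).2 =
      pvLast (pvTrim expr) := rfl
  rw [hLa]
  have hSI : PySem.List.sorted
      (List.foldl (fun acc sign =>
        acc ++ List.filter
          (fun i => PySem.Chars.startswith (PySem.List.slice (pvTrim expr) (some i) none) [sign])
          (PySem.List.pyRange 0 ((pvTrim expr).length : Int) 1)) [] pvMathSigns)
      (fun x => x) false = pvSignIds (pvTrim expr) := rfl
  rw [hSI]
  have hBr : (List.foldl pvStepA ([], []) (PySem.List.enumerate (pvTrim expr) 0)).2 =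
      pvBracket (pvTrim expr) := rfl
  rw [hBr]
  have hSG : PySem.List.sorted
      (List.foldl (fun acc i =>
        if i ∉ List.foldl (fun s p => if p.1 < i ∧ i < p.2 then s ++ [i] else s) []
            (pvBracket (pvTrim expr))
        then acc ++ [i] else acc) [] (pvSignIds (pvTrim expr)))
      (fun x => x) false = pvSigns (pvTrim expr) := rfl
  rw [hSG]
  have hstart := pvStartA_eq (pvTrim expr) hsafe
  cases hsig : pvSigns (pvTrim expr) with
  | nil =>
    have hlast : pvLast (pvTrim expr) = -1 := by
      rw [pvStartA, if_pos hsig] at hstart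
      omega
    rw [hlast, show (-1 : Int) + 1 = 0 by decide]
  | cons x t =>
    have heq : (PySem.List.max? (x :: t) (fun y => y)).getD 0 + 1 = pvLast (pvTrim expr) + 1 := by
      rw [pvStartA, if_neg (by rw [hsig]; exact List.cons_ne_nil x t), hsig] at hstart
      exact hstart
    rw [heq]

-- ===== VERDICT (by name: the statement is the Claim_ definition above) =====
theorem factorial_expr_spec : Claim_equal_factorial_expr := by
  intro expr _ hpre
  unfold Spec_factorial_expr
  exact pvFinal expr hpre
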